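-- pv_equiv track=rewrite | github.com/Konstantin-Kudayarov/python-common_modules | basic.py | check_is_path
-- ===== SOURCE A (Python) =====
-- def check_is_path(src_str:str):
--     invalid = r'<>:"/|?*'
--
--     for i in invalid:
--         if i in src_str:
--             if i == ':' and src_str.count(':')==1 and src_str.index(':')==1:
--                 continue
--             return False
--     invalid_combinations = ['\\.', '.\\', '\\..', '..\\',]
--     for i in invalid_combinations:
--         if i in src_str:
--             return False
--
--
--     return True
-- ===== SOURCE B (Python) =====
-- def check_is_path(src_str: str):
--     colon_count = 0
--     first_colon = -1
--     prev = None
--     for i, ch in enumerate(src_str):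
--         if ch in '<>"/|?*':
--             return False
--         if ch == ':':
--             colon_count += 1
--             if first_colon < 0:
--                 first_colon = i
--         if (prev == '\\' and ch == '.') or (prev == '.' and ch == '\\'):
--             return False
--         prev = ch
--     if colon_count > 0 and not (colon_count == 1 and first_colon == 1):
--         return False
--     return True
-- ===== Notes on version B (the rewrite author's own statement) =====
-- stated objective: alternative
-- what changed: Replaced A's many separate left-to-right scans (eight character membership tests, a count, an index and four substring searches) by one forward pass over the characters that tracks the previous character, the colon count and the first colon index.
import Mathlib
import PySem

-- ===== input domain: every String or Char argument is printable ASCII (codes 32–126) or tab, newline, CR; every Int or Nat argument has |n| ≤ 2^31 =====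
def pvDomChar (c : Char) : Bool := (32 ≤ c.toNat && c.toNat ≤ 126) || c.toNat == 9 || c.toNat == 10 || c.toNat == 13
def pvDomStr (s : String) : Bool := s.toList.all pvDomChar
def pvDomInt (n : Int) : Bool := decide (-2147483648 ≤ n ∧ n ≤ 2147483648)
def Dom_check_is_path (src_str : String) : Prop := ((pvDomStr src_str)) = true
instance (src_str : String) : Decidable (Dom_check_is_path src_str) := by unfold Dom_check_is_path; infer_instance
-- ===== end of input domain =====

-- B replaces A's many left-to-right scans (eight membership tests, a count, an index, four
-- substring searches) by one forward pass over the characters; same cost class, alternative structure.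

-- ===== PORT A =====
-- for-loop over the invalid characters with early `return False`; `some b` = early return, `none` = fell through
def aInvalidLoop (s : List Char) : List Char → Option Bool
  | [] => none
  | i :: rest =>
    if PySem.Chars.isIn [i] s then
      -- Python `src_str.index(':')`: guarded by `':' in src_str`, where index = find (exact)
      if i = ':' ∧ PySem.Chars.count s [':'] = 1 ∧ PySem.Chars.find s [':'] = 1 then
        aInvalidLoop s rest
      else some false
    else aInvalidLoop s rest

-- for-loop over the invalid two/three-character combinations with early `return False`
def aComboLoop (s : List Char) : List (List Char) → Option Bool
  | [] => none
  | i :: rest => if PySem.Chars.isIn i s then some false else aComboLoop s rest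

def check_is_path (src_str : String) : Bool :=
  match aInvalidLoop src_str.toList ['<', '>', ':', '"', '/', '|', '?', '*'] with
  | some b => b
  | none =>
    match aComboLoop src_str.toList [['\\', '.'], ['.', '\\'], ['\\', '.', '.'], ['.', '.', '\\']] with
    | some b => b
    | none => true

-- ===== PORT B =====
-- single forward pass; state = (enumerate index, previous char, colon count, first colon index)
def bLoop : List Char → Nat → Option Char → Int → Int → Bool
  | [], _, _, cc, fc => if cc > 0 ∧ ¬(cc = 1 ∧ fc = 1) then false else true
  | ch :: rest, i, prev, cc, fc =>
    if ['<', '>', '"', '/', '|', '?', '*'].contains ch then false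
    else
      let cc' := if ch = ':' then cc + 1 else cc
      let fc' := if ch = ':' ∧ fc < 0 then (i : Int) else fc
      if (prev = some '\\' ∧ ch = '.') ∨ (prev = some '.' ∧ ch = '\\') then false
      else bLoop rest (i + 1) (some ch) cc' fc'

def check_is_path_alt (src_str : String) : Bool :=
  bLoop src_str.toList 0 none 0 (-1)

-- ===== PRECONDITION & SPEC =====
def Spec_check_is_path (src_str : String) (out : Bool) : Prop := out = check_is_path_alt src_str
instance (src_str : String) (out : Bool) : Decidable (Spec_check_is_path src_str out) := by unfold Spec_check_is_path; infer_instance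

-- ===== CLAIM (what is proved, stated in full; the proofs are below) =====
def Claim_equal_check_is_path : Prop := ∀ (src_str : String), Dom_check_is_path src_str → Spec_check_is_path src_str (check_is_path src_str)

-- ===== LEMMAS AND PROOFS =====

-- index of the first ':' in the list, if any
def firstColon : List Char → Option Nat
  | [] => none
  | c :: t => if c = ':' then some 0 else (firstColon t).map (· + 1)

-- no adjacent pair '\.' or '.\' in (prev?, s) read as one sequence
def noBadPairFrom : Option Char → List Char → Bool
  | _, [] => true
  | prev, c :: t =>
    !decide ((prev = some '\\' ∧ c = '.') ∨ (prev = some '.' ∧ c = '\\')) && noBadPairFrom (some c) t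

-- the common normal form both ports are reduced to
def goodCore (s : List Char) : Bool :=
  let cc : Int := (s.count ':' : Int)
  let fc : Int := match firstColon s with | some k => (k : Int) | none => -1
  (s.all fun c => !(['<', '>', '"', '/', '|', '?', '*'].contains c)) &&
  noBadPairFrom none s &&
  (if cc > 0 ∧ ¬(cc = 1 ∧ fc = 1) then false else true)

lemma countgo_colon : ∀ (l : List Char) (fuel acc : Nat), l.length ≤ fuel →
    PySem.Chars.count.go [':'] fuel l acc = acc + l.count ':' := by
  intro l
  induction l with
  | nil => intro fuel acc _; cases fuel <;> simp [PySem.Chars.count.go]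
  | cons h t ih =>
    intro fuel acc hf
    cases fuel with
    | zero => simp at hf
    | succ n =>
      rw [PySem.Chars.count.go]
      by_cases hc : h = ':'
      · subst hc
        have hp : List.isPrefixOf [':'] (':' :: t) = true := by simp [List.isPrefixOf]
        rw [hp]
        simp only [if_true]
        rw [show List.drop [':'].length (':' :: t) = t from rfl]
        rw [ih n (acc + 1) (by simp at hf; omega)]
        simp
        omega
      · have hc' : (':' : Char) ≠ h := fun h' => hc h'.symm
        have hp : List.isPrefixOf [':'] (h :: t) = false := by simp [List.isPrefixOf, hc']
        rw [hp]
        simp only [Bool.false_eq_true, if_false]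
        rw [ih n acc (by simp at hf; omega)]
        simp [hc]

lemma count_colon (s : List Char) : PySem.Chars.count s [':'] = s.count ':' := by
  rw [PySem.Chars.count]
  simp [countgo_colon s s.length 0 le_rfl]

lemma findgo_colon : ∀ (l : List Char) (k : Nat),
    PySem.Chars.find.go [':'] l k =
      (match firstColon l with | some j => ((k + j : Nat) : Int) | none => -1) := by
  intro l
  induction l with
  | nil => intro k; simp [PySem.Chars.find.go, firstColon]
  | cons h t ih =>
    intro k
    rw [PySem.Chars.find.go]
    by_cases hc : h = ':'
    · subst hc
      have hp : List.isPrefixOf [':'] (':' :: t) = true := by simp [List.isPrefixOf]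
      rw [hp]
      simp [firstColon]
    · have hc' : (':' : Char) ≠ h := fun h' => hc h'.symm
      have hp : List.isPrefixOf [':'] (h :: t) = false := by simp [List.isPrefixOf, hc']
      rw [hp]
      simp only [Bool.false_eq_true, if_false]
      rw [ih (k + 1)]
      cases hf : firstColon t with
      | none => simp [firstColon, hc, hf]
      | some j =>
        simp only [firstColon, hc, hf, if_false, Option.map_some]
        push_cast
        ring

lemma find_colon (s : List Char) :
    PySem.Chars.find s [':'] = (match firstColon s with | some j => (j : Int) | none => -1) := by
  rw [PySem.Chars.find, findgo_colon]
  cases firstColon s <;> simp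

lemma isIn_singleton (c : Char) (s : List Char) : PySem.Chars.isIn [c] s = s.contains c := by
  have h1 : (PySem.Chars.isIn [c] s = true) ↔ ([c] <:+: s) := PySem.Chars.isIn_iff_infix _ _
  have h2 : ([c] <:+: s) ↔ c ∈ s := by
    constructor
    · intro h; exact List.singleton_sublist.mp h.sublist
    · intro h
      obtain ⟨l1, l2, rfl⟩ := List.append_of_mem h
      exact ⟨l1, l2, by simp⟩
  cases hb : s.contains c with
  | true => have : c ∈ s := by simpa using hb
            simp [h1.mpr (h2.mpr this)]
  | false => have : c ∉ s := by simpa using hb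
             by_contra hne
             simp at hne
             exact this (h2.mp (h1.mp hne))

lemma pair_infix_cons (a b c : Char) (t : List Char) :
    [a, b] <:+: c :: t ↔ (c = a ∧ t.head? = some b) ∨ [a, b] <:+: t := by
  rw [List.infix_cons_iff]
  have hp : ([a, b] <+: c :: t) ↔ (c = a ∧ t.head? = some b) := by
    rw [List.cons_prefix_cons]
    constructor
    · rintro ⟨rfl, h⟩
      refine ⟨rfl, ?_⟩
      cases t with
      | nil => simp at h
      | cons x xs => rw [List.cons_prefix_cons] at h; simp [h.1]
    · rintro ⟨rfl, h⟩
      cases t with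
      | nil => simp at h
      | cons x xs =>
        simp at h
        exact ⟨rfl, by rw [List.cons_prefix_cons]; simp [h]⟩
  rw [hp]

lemma firstColon_none_iff (s : List Char) : firstColon s = none ↔ ':' ∉ s := by
  induction s with
  | nil => simp [firstColon]
  | cons h t ih =>
    by_cases hc : h = ':'
    · subst hc; simp [firstColon]
    · have hc' : (':' : Char) ≠ h := fun h' => hc h'.symm
      simp [firstColon, hc, ih, hc']

lemma noBadPairFrom_some_iff : ∀ (s : List Char) (p : Char),
    noBadPairFrom (some p) s = true ↔
      ¬((p = '\\' ∧ s.head? = some '.') ∨ (p = '.' ∧ s.head? = some '\\')) ∧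
      ¬ ['\\', '.'] <:+: s ∧ ¬ ['.', '\\'] <:+: s := by
  intro s
  induction s with
  | nil => intro p; simp [noBadPairFrom]
  | cons c t ih =>
    intro p
    simp only [noBadPairFrom, Bool.and_eq_true, Bool.not_eq_eq_eq_not, Bool.not_true,
      decide_eq_false_iff_not, ih c, pair_infix_cons, List.head?_cons, Option.some.injEq]
    tauto

lemma noBadPairFrom_none_iff (s : List Char) :
    noBadPairFrom none s = true ↔ ¬ ['\\', '.'] <:+: s ∧ ¬ ['.', '\\'] <:+: s := by
  cases s with
  | nil => simp [noBadPairFrom]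
  | cons c t =>
    simp only [noBadPairFrom, Bool.and_eq_true, Bool.not_eq_eq_eq_not, Bool.not_true,
      decide_eq_false_iff_not, noBadPairFrom_some_iff t c, pair_infix_cons,
      reduceCtorEq, false_and, or_self, not_false_iff, true_and]
    tauto


lemma comboLoop_eq (s : List Char) :
    aComboLoop s [['\\', '.'], ['.', '\\'], ['\\', '.', '.'], ['.', '.', '\\']] =
      if noBadPairFrom none s then none else some false := by
  by_cases h1 : ['\\', '.'] <:+: s
  · have e1 : PySem.Chars.isIn ['\\', '.'] s = true := (PySem.Chars.isIn_iff_infix _ _).mpr h1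
    have hn : noBadPairFrom none s = false := by
      rw [Bool.eq_false_iff]
      intro h
      exact ((noBadPairFrom_none_iff s).mp h).1 h1
    simp [aComboLoop, e1, hn]
  · by_cases h2 : ['.', '\\'] <:+: s
    · have e1 : PySem.Chars.isIn ['\\', '.'] s = false := (PySem.Chars.isIn_eq_false_iff _ _).mpr h1
      have e2 : PySem.Chars.isIn ['.', '\\'] s = true := (PySem.Chars.isIn_iff_infix _ _).mpr h2
      have hn : noBadPairFrom none s = false := by
        rw [Bool.eq_false_iff]
        intro h
        exact ((noBadPairFrom_none_iff s).mp h).2 h2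
      simp [aComboLoop, e1, e2, hn]
    · have h3 : ¬ ['\\', '.', '.'] <:+: s := fun h =>
        h1 (List.IsInfix.trans ⟨[], ['.'], rfl⟩ h)
      have h4 : ¬ ['.', '.', '\\'] <:+: s := fun h =>
        h2 (List.IsInfix.trans ⟨['.'], [], rfl⟩ h)
      have e1 : PySem.Chars.isIn ['\\', '.'] s = false := (PySem.Chars.isIn_eq_false_iff _ _).mpr h1
      have e2 : PySem.Chars.isIn ['.', '\\'] s = false := (PySem.Chars.isIn_eq_false_iff _ _).mpr h2
      have e3 : PySem.Chars.isIn ['\\', '.', '.'] s = false := (PySem.Chars.isIn_eq_false_iff _ _).mpr h3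
      have e4 : PySem.Chars.isIn ['.', '.', '\\'] s = false := (PySem.Chars.isIn_eq_false_iff _ _).mpr h4
      have hn : noBadPairFrom none s = true := (noBadPairFrom_none_iff s).mpr ⟨h1, h2⟩
      simp [aComboLoop, e1, e2, e3, e4, hn]

lemma fc_match_eq_one_iff (s : List Char) :
    ((match firstColon s with | some k => (k : Int) | none => -1) = 1) ↔ firstColon s = some 1 := by
  cases hf : firstColon s with
  | none => simp
  | some k => simp

lemma aInvalidLoop_step_ne (s : List Char) (i : Char) (rest : List Char) (hi : i ≠ ':') :
    aInvalidLoop s (i :: rest) = if i ∈ s then some false else aInvalidLoop s rest := by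
  simp only [aInvalidLoop, isIn_singleton]
  by_cases h : i ∈ s
  · have hc : s.contains i = true := by simpa using h
    rw [if_pos hc, if_neg (fun hh => hi hh.1), if_pos h]
  · have hc : ¬(s.contains i = true) := by simpa using h
    rw [if_neg hc, if_neg h]

lemma aInvalidLoop_step_colon (s rest : List Char) :
    aInvalidLoop s (':' :: rest) =
      if ':' ∈ s then
        (if s.count ':' = 1 ∧ firstColon s = some 1 then aInvalidLoop s rest else some false)
      else aInvalidLoop s rest := by
  simp only [aInvalidLoop, isIn_singleton, count_colon, find_colon]
  by_cases h : ':' ∈ s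
  · have hc : s.contains ':' = true := by simpa using h
    rw [if_pos hc, if_pos h]
    apply if_congr _ rfl rfl
    rw [fc_match_eq_one_iff]
    tauto
  · have hc : ¬(s.contains ':' = true) := by simpa using h
    rw [if_neg hc, if_neg h]

lemma invalidLoop_eq (s : List Char) :
    aInvalidLoop s ['<', '>', ':', '"', '/', '|', '?', '*'] =
      if '<' ∈ s ∨ '>' ∈ s ∨ '"' ∈ s ∨ '/' ∈ s ∨ '|' ∈ s ∨ '?' ∈ s ∨ '*' ∈ s then some false
      else if ':' ∈ s ∧ ¬(s.count ':' = 1 ∧ firstColon s = some 1) then some false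
      else none := by
  rw [aInvalidLoop_step_ne s '<' _ (by decide), aInvalidLoop_step_ne s '>' _ (by decide),
    aInvalidLoop_step_colon, aInvalidLoop_step_ne s '"' _ (by decide),
    aInvalidLoop_step_ne s '/' _ (by decide), aInvalidLoop_step_ne s '|' _ (by decide),
    aInvalidLoop_step_ne s '?' _ (by decide), aInvalidLoop_step_ne s '*' _ (by decide),
    show aInvalidLoop s [] = none from rfl]
  by_cases h1 : '<' ∈ s
  · rw [if_pos h1, if_pos (Or.inl h1)]
  rw [if_neg h1]
  by_cases h2 : '>' ∈ s
  · rw [if_pos h2, if_pos (Or.inr (Or.inl h2))]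
  rw [if_neg h2]
  by_cases h3 : '"' ∈ s
  · rw [if_pos h3, if_pos (Or.inr (Or.inr (Or.inl h3)))]
    split_ifs <;> rfl
  rw [if_neg h3]
  by_cases h4 : '/' ∈ s
  · rw [if_pos h4, if_pos (Or.inr (Or.inr (Or.inr (Or.inl h4))))]
    split_ifs <;> rfl
  rw [if_neg h4]
  by_cases h5 : '|' ∈ s
  · rw [if_pos h5, if_pos (Or.inr (Or.inr (Or.inr (Or.inr (Or.inl h5)))))]
    split_ifs <;> rfl
  rw [if_neg h5]
  by_cases h6 : '?' ∈ s
  · rw [if_pos h6, if_pos (Or.inr (Or.inr (Or.inr (Or.inr (Or.inr (Or.inl h6))))))]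
    split_ifs <;> rfl
  rw [if_neg h6]
  by_cases h7 : '*' ∈ s
  · rw [if_pos h7, if_pos (Or.inr (Or.inr (Or.inr (Or.inr (Or.inr (Or.inr h7))))))]
    split_ifs <;> rfl
  rw [if_neg h7, if_neg (by tauto : ¬('<' ∈ s ∨ '>' ∈ s ∨ '"' ∈ s ∨ '/' ∈ s ∨ '|' ∈ s ∨ '?' ∈ s ∨ '*' ∈ s))]
  by_cases hc : ':' ∈ s
  · rw [if_pos hc]
    by_cases hP : s.count ':' = 1 ∧ firstColon s = some 1
    · rw [if_pos hP, if_neg (by tauto : ¬(':' ∈ s ∧ ¬(s.count ':' = 1 ∧ firstColon s = some 1)))]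
    · rw [if_neg hP, if_pos ⟨hc, hP⟩]
  · rw [if_neg hc, if_neg (by tauto : ¬(':' ∈ s ∧ ¬(s.count ':' = 1 ∧ firstColon s = some 1)))]

lemma goodCore_false_of_mem {c : Char} (hc : c ∈ ['<', '>', '"', '/', '|', '?', '*'])
    {s : List Char} (h : c ∈ s) : goodCore s = false := by
  have hall : (s.all fun c => !(['<', '>', '"', '/', '|', '?', '*'].contains c)) = false := by
    rw [List.all_eq_false]
    exact ⟨c, h, by simp_all⟩
  simp only [goodCore]
  rw [hall]
  simp

lemma goodCore_false_of_colonbad {s : List Char} (hmem : ':' ∈ s)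
    (hbad : ¬(s.count ':' = 1 ∧ firstColon s = some 1)) : goodCore s = false := by
  have hcc : (0 : Int) < (s.count ':' : Int) := by exact_mod_cast List.count_pos_iff.mpr hmem
  have hcond : ((s.count ':' : Int) > 0 ∧
      ¬((s.count ':' : Int) = 1 ∧
        (match firstColon s with | some k => (k : Int) | none => -1) = 1)) := by
    refine ⟨hcc, ?_⟩
    rintro ⟨hc1, hc2⟩
    exact hbad ⟨by exact_mod_cast hc1, (fc_match_eq_one_iff s).mp hc2⟩
  simp only [goodCore]
  rw [if_pos hcond]
  simp

lemma goodCore_true {s : List Char}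
    (hall : '<' ∉ s ∧ '>' ∉ s ∧ '"' ∉ s ∧ '/' ∉ s ∧ '|' ∉ s ∧ '?' ∉ s ∧ '*' ∉ s)
    (hcolon : ':' ∈ s → (s.count ':' = 1 ∧ firstColon s = some 1))
    (hpair : noBadPairFrom none s = true) : goodCore s = true := by
  obtain ⟨n1, n2, n3, n4, n5, n6, n7⟩ := hall
  have hall' : (s.all fun c => !(['<', '>', '"', '/', '|', '?', '*'].contains c)) = true := by
    rw [List.all_eq_true]
    intro x hx
    simp only [List.contains_cons, List.contains_nil, Bool.or_false, Bool.not_eq_eq_eq_not,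
      Bool.not_true, Bool.or_eq_false_iff, beq_eq_false_iff_ne, ne_eq]
    exact ⟨fun h => n1 (h ▸ hx), fun h => n2 (h ▸ hx), fun h => n3 (h ▸ hx),
      fun h => n4 (h ▸ hx), fun h => n5 (h ▸ hx), fun h => n6 (h ▸ hx), fun h => n7 (h ▸ hx)⟩
  by_cases hm : ':' ∈ s
  · obtain ⟨h1, h2⟩ := hcolon hm
    simp only [goodCore]
    rw [hall', hpair, h1, h2]
    norm_num
  · have h0 : s.count ':' = 0 := List.count_eq_zero.mpr hm
    have hf0 : firstColon s = none := (firstColon_none_iff s).mpr hm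
    simp only [goodCore]
    rw [hall', hpair, h0, hf0]
    norm_num

lemma a_eq_goodCore (src_str : String) : check_is_path src_str = goodCore src_str.toList := by
  unfold check_is_path
  rw [invalidLoop_eq, comboLoop_eq]
  by_cases m : '<' ∈ src_str.toList ∨ '>' ∈ src_str.toList ∨ '"' ∈ src_str.toList ∨
      '/' ∈ src_str.toList ∨ '|' ∈ src_str.toList ∨ '?' ∈ src_str.toList ∨ '*' ∈ src_str.toList
  · rw [if_pos m]
    rcases m with h | h | h | h | h | h | h <;>
      exact (goodCore_false_of_mem (by simp) h).symm
  · rw [if_neg m]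
    rw [not_or, not_or, not_or, not_or, not_or, not_or] at m
    by_cases mc : ':' ∈ src_str.toList ∧
        ¬(src_str.toList.count ':' = 1 ∧ firstColon src_str.toList = some 1)
    · rw [if_pos mc]
      exact (goodCore_false_of_colonbad mc.1 mc.2).symm
    · rw [if_neg mc]
      cases hn : noBadPairFrom none src_str.toList with
      | false =>
        have hg : goodCore src_str.toList = false := by
          simp only [goodCore]
          rw [hn]
          simp
        rw [hg]
        rfl
      | true =>
        have hcolon : ':' ∈ src_str.toList →
            (src_str.toList.count ':' = 1 ∧ firstColon src_str.toList = some 1) := by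
          intro hm
          by_contra hb
          exact mc ⟨hm, hb⟩
        rw [(goodCore_true m hcolon hn)]
        rfl

lemma bLoop_eq : ∀ (s : List Char) (i : Nat) (prev : Option Char) (cc fc : Int),
    bLoop s i prev cc fc =
      ((s.all fun c => !(['<', '>', '"', '/', '|', '?', '*'].contains c)) &&
       noBadPairFrom prev s &&
       (if (cc + (s.count ':' : Int)) > 0 ∧
           ¬((cc + (s.count ':' : Int)) = 1 ∧
             (if fc < 0 then
                (match firstColon s with | some k => ((i + k : Nat) : Int) | none => fc)
              else fc) = 1)
        then false else true)) := by
  intro s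
  induction s with
  | nil =>
    intro i prev cc fc
    simp [bLoop, noBadPairFrom, firstColon]
  | cons ch t ih =>
    intro i prev cc fc
    show (if (['<', '>', '"', '/', '|', '?', '*'].contains ch) = true then false
          else if (prev = some '\\' ∧ ch = '.') ∨ (prev = some '.' ∧ ch = '\\') then false
          else bLoop t (i + 1) (some ch) (if ch = ':' then cc + 1 else cc)
                 (if ch = ':' ∧ fc < 0 then (i : Int) else fc)) = _
    by_cases hbad : (['<', '>', '"', '/', '|', '?', '*'].contains ch) = true
    · rw [if_pos hbad]
      simp only [List.all_cons]
      rw [hbad]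
      simp only [Bool.not_true, Bool.false_and]
    · have hbad' : (['<', '>', '"', '/', '|', '?', '*'].contains ch) = false :=
        (Bool.not_eq_true _).mp hbad
      rw [if_neg hbad]
      by_cases hpair : ((prev = some '\\' ∧ ch = '.') ∨ (prev = some '.' ∧ ch = '\\'))
      · rw [if_pos hpair]
        simp only [List.all_cons, noBadPairFrom]
        rw [decide_eq_true hpair]
        simp only [Bool.not_true, Bool.false_and, Bool.and_false]
      · rw [if_neg hpair, ih]
        simp only [List.all_cons, noBadPairFrom]
        rw [hbad', decide_eq_false hpair]
        simp only [Bool.not_false, Bool.true_and]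
        congr 1
        apply if_congr _ rfl rfl
        have hnn : ¬((i : Int) < 0) := by omega
        by_cases hch : ch = ':'
        · subst hch
          by_cases hfc : fc < 0
          · simp [firstColon, hfc, hnn]
            omega
          · simp [firstColon, hfc]
            omega
        · have hch' : ¬((':' : Char) = ch) := fun h => hch h.symm
          by_cases hfc : fc < 0
          · cases hf : firstColon t with
            | none =>
              have hr : firstColon (ch :: t) = none := by simp [firstColon, hch, hf]
              simp [hr, hf, hfc, hch, List.count_cons, hch']
            | some k =>
              have hr : firstColon (ch :: t) = some (k + 1) := by simp [firstColon, hch, hf]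
              simp [hr, hf, hfc, hch, List.count_cons, hch']
              intro _
              have he : ((i : Int) + 1 + (k : Int)) = (i : Int) + ((k : Int) + 1) := by ring
              rw [he]
          · simp [firstColon, List.count_cons, hch, hch', hfc]

lemma b_eq_goodCore (src_str : String) : check_is_path_alt src_str = goodCore src_str.toList := by
  unfold check_is_path_alt
  rw [bLoop_eq]
  simp only [goodCore]
  congr 1
  cases firstColon src_str.toList <;> simp

-- ===== VERDICT (by name: the statement is the Claim_ definition above) =====
theorem check_is_path_spec : Claim_equal_check_is_path := by
  intro s _
  unfold Spec_check_is_path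
  rw [a_eq_goodCore, b_eq_goodCore]
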